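-- pv_equiv track=rewrite | github.com/TomWatson6/AdventOfCode | Python/2016_new/7/solution.py | bab
-- ===== SOURCE A (Python) =====
-- def bab(letters):
--     abas = []
--
--     for i in range(len(letters) - 2):
--         j = i + 3
--         segment = letters[i:j]
--
--         if segment[0] == segment[2] and segment[1] != segment[0]:
--             abas.append(segment)
--
--     return [a[1] + a[0] + a[1] for a in abas]
-- ===== SOURCE B (Python) =====
-- import re
--
-- _ABA = re.compile(r'(?=([\s\S])([\s\S])\1)')
--
-- def bab(letters):
--     out = []
--     for m in _ABA.finditer(letters):
--         a, b = m.group(1), m.group(2)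
--         if a != b:
--             out.append(b + a + b)
--     return out
-- ===== Notes on version B (the rewrite author's own statement) =====
-- stated objective: idiomatic
-- what changed: Replaces the manual index loop over letters[i:i+3] slices (and the second comprehension over the collected segments) with the regex engine: a compiled zero-width-lookahead pattern (?=([\s\S])([\s\S])\1) whose backreference enforces a==c, finditer yielding every overlapping match, with a post-filter a!=b emitting b+a+b.
import Mathlib
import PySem

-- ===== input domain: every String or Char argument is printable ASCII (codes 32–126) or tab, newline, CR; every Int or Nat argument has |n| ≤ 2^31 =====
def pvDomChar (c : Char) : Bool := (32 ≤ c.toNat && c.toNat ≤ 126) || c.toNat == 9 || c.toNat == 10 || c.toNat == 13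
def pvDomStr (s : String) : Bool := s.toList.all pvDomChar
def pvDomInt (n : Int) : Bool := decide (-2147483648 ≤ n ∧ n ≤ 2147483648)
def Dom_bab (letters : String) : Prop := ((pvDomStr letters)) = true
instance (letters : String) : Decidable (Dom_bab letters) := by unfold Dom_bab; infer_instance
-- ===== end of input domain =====

-- B replaces A's index loop over 3-character slices (plus a second comprehension) by the
-- regex engine: finditer of the lookahead (?=([\s\S])([\s\S])\1) with a post-filter a != b;
-- same O(n) cost, more idiomatic.

-- ===== PORT A =====
-- loop body: segment = letters[i:i+3]; if segment[0] == segment[2] and segment[1] != segment[0]: abas.append(segment)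
def babStep (cs : List Char) (abas : List (List Char)) (i : Int) : List (List Char) :=
  let j := i + 3
  let segment := PySem.List.slice cs (some i) (some j)
  match PySem.List.pyGet? segment 0, PySem.List.pyGet? segment 2, PySem.List.pyGet? segment 1 with
  | some s0, some s2, some s1 => if s0 == s2 && !(s1 == s0) then abas ++ [segment] else abas
  | _, _, _ => abas  -- unreachable: every segment in the loop has 3 characters; Python indexing cannot raise here

-- a[1] + a[0] + a[1] (a is a 3-character segment)
def babMk (a : List Char) : List Char :=
  match PySem.List.pyGet? a 1, PySem.List.pyGet? a 0 with
  | some a1, some a0 => [a1, a0, a1]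
  | _, _ => []  -- unreachable for the 3-character segments A collects

def bab (letters : String) : List String :=
  let cs := letters.toList
  let abas := (PySem.List.pyRange 0 (PySem.List.len cs - 2) 1).foldl (babStep cs) []
  abas.map (fun a => String.ofList (babMk a))

-- ===== PORT B =====
-- PySem has no regex engine, so the regex is ported by hand, step for step, with its exact
-- semantics on this pattern: the zero-width lookahead (?=([\s\S])([\s\S])\1) matches at a
-- position iff three characters remain there and the first equals the third (the \1
-- backreference); [\s\S] matches ANY character. The match attempt at one position:
def babMatchAt (cs : List Char) : Option (Char × Char) :=
  match cs with
  | a :: b :: c :: _ => if a == c then some (a, b) else none  -- groups (1) = a, (2) = b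
  | _ => none

-- finditer: attempt the pattern at every position left to right; the match is zero-width,
-- so the engine advances one character after each attempt (overlapping matches are all found).
def babFinditer (cs : List Char) : List (Char × Char) :=
  match cs with
  | [] => []
  | x :: t => (match babMatchAt (x :: t) with | some p => [p] | none => []) ++ babFinditer t

-- the loop body: for each match, a = group(1), b = group(2); if a != b: out.append(b + a + b)
def bab_alt (letters : String) : List String :=
  (babFinditer letters.toList).foldl
    (fun out p => if !(p.1 == p.2) then out ++ [String.ofList [p.2, p.1, p.2]] else out) []

-- ===== PRECONDITION & SPEC =====
def Spec_bab (letters : String) (out : List String) : Prop := out = bab_alt letters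
instance (letters : String) (out : List String) : Decidable (Spec_bab letters out) := by unfold Spec_bab; infer_instance

-- ===== CLAIM (what is proved, stated in full; the proofs are below) =====
def Claim_equal_bab : Prop := ∀ (letters : String), Dom_bab letters → Spec_bab letters (bab letters)

-- ===== LEMMAS AND PROOFS =====

-- the k-th overlapping 3-character window
def babSeg (cs : List Char) (k : Nat) : List Char := (cs.drop k).take 3

def babCond (t : List Char) : Bool :=
  match t with
  | [x, y, z] => x == z && !(y == x)
  | _ => false

def babOut (t : List Char) : String :=
  match t with
  | [x, y, _] => String.ofList [y, x, y]
  | _ => ""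

def babG (cs : List Char) (k : Nat) : Option String :=
  if babCond (babSeg cs k) then some (babOut (babSeg cs k)) else none

lemma babSeg_three (cs : List Char) (k : Nat) (h : k + 3 ≤ cs.length) :
    ∃ x y z, babSeg cs k = [x, y, z] := by
  have hl : (babSeg cs k).length = 3 := by
    simp [babSeg]
    omega
  exact List.length_eq_three.mp hl

lemma babStep_eq (cs : List Char) (acc : List (List Char)) (k : Nat) (h : k + 3 ≤ cs.length) :
    babStep cs acc (k : Int) =
      if babCond (babSeg cs k) then acc ++ [babSeg cs k] else acc := by
  have hs : PySem.List.slice cs (some (k : Int)) (some ((k : Int) + 3)) = babSeg cs k := by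
    rw [PySem.List.slice_toNat cs (by positivity) (by positivity)]
    simp [babSeg]
    congr 1
    omega
  obtain ⟨x, y, z, hseg⟩ := babSeg_three cs k h
  simp only [babStep, hs, hseg, babCond, PySem.List.pyGet?, PySem.List.pyIdx?]
  simp [show Int.toNat 2 = 2 from rfl]

lemma babG_eq (cs : List Char) (k : Nat) :
    (if babCond (babSeg cs k) then some (String.ofList (babMk (babSeg cs k))) else none) = babG cs k := by
  unfold babG
  match hseg : babSeg cs k with
  | [] => simp [babCond]
  | [_] => simp [babCond]
  | [_, _] => simp [babCond]
  | x :: y :: z :: w :: r => simp [babCond]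
  | [x, y, z] =>
    simp [babCond, babMk, babOut, PySem.List.pyGet?, PySem.List.pyIdx?]

lemma bab_filter_map {α β : Type} (l : List α) (p : α → Bool) (f : α → β) :
    (l.filter p).map f = l.filterMap (fun x => if p x then some (f x) else none) := by
  induction l with
  | nil => rfl
  | cons a l ih =>
    by_cases hp : p a <;> simp [hp, ih]

lemma bab_A_char (letters : String) :
    bab letters =
      (List.range (letters.toList.length - 2)).filterMap (babG letters.toList) := by
  set cs := letters.toList with hcs
  show ((PySem.List.pyRange 0 (PySem.List.len cs - 2) 1).foldl (babStep cs) []).map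
      (fun a => String.ofList (babMk a)) = _
  have hn : ((PySem.List.len cs - 2 : Int) - 0).toNat = cs.length - 2 := by
    simp [PySem.List.len]
    omega
  rw [PySem.List.pyRange_one, hn, List.foldl_map]
  have hmem : ∀ k, k ∈ List.range (cs.length - 2) → k + 3 ≤ cs.length := by
    intro k hk
    rw [List.mem_range] at hk
    omega
  rw [List.foldl_ext (g := fun acc k =>
        if babCond (babSeg cs k) then acc ++ [babSeg cs k] else acc)
      (H := by
        intro acc k hk
        have h3 := hmem k hk
        simpa using babStep_eq cs acc k h3)]
  rw [PySem.List.foldl_append_if, List.nil_append, List.map_map, bab_filter_map]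
  exact List.filterMap_congr (fun k _ => babG_eq cs k)

-- B's post-filter-and-emit, as the option it contributes per match
def babF (p : Char × Char) : Option String :=
  if !(p.1 == p.2) then some (String.ofList [p.2, p.1, p.2]) else none

lemma babFinditer_filterMap : ∀ cs : List Char,
    (babFinditer cs).filterMap babF = (List.range (cs.length - 2)).filterMap (babG cs) := by
  intro cs
  induction cs with
  | nil => rfl
  | cons x t ih =>
    match t with
    | [] => rfl
    | [_] => rfl
    | y :: z :: r =>
      have hfd : babFinditer (x :: y :: z :: r) =
          (if x == z then [(x, y)] else []) ++ babFinditer (y :: z :: r) := by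
        simp only [babFinditer, babMatchAt]
        by_cases hxz : x = z <;> simp [hxz]
      have hlen : (x :: y :: z :: r).length - 2 = r.length + 1 := by
        simp only [List.length_cons]
        omega
      have hshift : (babG (x :: y :: z :: r) ∘ fun k => k + 1) = babG (y :: z :: r) := by
        funext k
        simp [babG, babSeg]
      have ih' : (babFinditer (y :: z :: r)).filterMap babF =
          (List.range r.length).filterMap (babG (y :: z :: r)) := by
        have hl2 : (y :: z :: r).length - 2 = r.length := by
          simp only [List.length_cons]
          omega
        rw [ih, hl2]
      have hhead : (if x == z then [(x, y)] else []).filterMap babF =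
          ((babG (x :: y :: z :: r) 0).toList) := by
        by_cases hxz : x = z
        · subst hxz
          by_cases hyx : y = x
          · subst hyx
            simp [babF, babG, babSeg, babCond]
          · have hxy : ¬ x = y := fun h => hyx h.symm
            simp [hyx, hxy, babF, babG, babSeg, babCond, babOut]
        · simp [hxz, babG, babSeg, babCond]
      rw [hfd, List.filterMap_append, hlen, List.range_succ_eq_map, List.filterMap_cons,
          List.filterMap_map, hshift, ← ih', hhead]
      cases babG (x :: y :: z :: r) 0 <;> simp

-- ===== VERDICT (by name: the statement is the Claim_ definition above) =====
theorem bab_spec : Claim_equal_bab := by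
  intro letters _
  unfold Spec_bab
  have hB : bab_alt letters = (babFinditer letters.toList).filterMap babF := by
    show (babFinditer letters.toList).foldl _ [] = _
    rw [PySem.List.foldl_append_if, List.nil_append, bab_filter_map]
    rfl
  rw [bab_A_char, hB, babFinditer_filterMap]
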